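-- pv_equiv track=rewrite | github.com/raczandras/szkriptnyelvek | HF/4/munchausen.py | isMun
-- ===== SOURCE A (Python) =====
-- def isMun(szam):
--     tarto = szam
--     veg = 0
--
--     while tarto != 0:
--         if tarto % 10 != 0:
--             veg += (tarto % 10)**(tarto % 10)
--         tarto = tarto // 10
--
--     return (veg == szam)
-- ===== SOURCE B (Python) =====
-- def isMun(szam):
--     counts = {}
--     for ch in str(szam):
--         counts[ch] = counts.get(ch, 0) + 1
--     return szam == sum(n * int(d) ** int(d) for d, n in counts.items() if d != '0')
-- ===== Notes on version B (the rewrite author's own statement) =====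
-- stated objective: alternative
-- what changed: Replaces the arithmetic digit-peeling while-loop by a two-stage computation: first build a histogram (dict) of the characters of str(szam), then take the multiplicity-weighted sum of d**d over the distinct nonzero digits and compare it to szam.
import Mathlib
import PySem

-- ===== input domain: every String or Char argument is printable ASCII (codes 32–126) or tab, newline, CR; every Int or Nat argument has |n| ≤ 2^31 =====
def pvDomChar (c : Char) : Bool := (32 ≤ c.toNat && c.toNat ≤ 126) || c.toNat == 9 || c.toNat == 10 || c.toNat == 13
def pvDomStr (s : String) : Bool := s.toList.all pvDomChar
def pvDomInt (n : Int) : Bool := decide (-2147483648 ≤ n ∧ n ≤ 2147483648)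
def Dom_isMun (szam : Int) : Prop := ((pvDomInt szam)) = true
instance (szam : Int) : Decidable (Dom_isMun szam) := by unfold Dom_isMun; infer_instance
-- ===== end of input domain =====

-- B replaces A's digit-peeling while-loop by two stages: build a histogram (dict) of the
-- characters of str(szam), then take the multiplicity-weighted sum of d**d over the distinct
-- nonzero digits; same cost, different data structure.

-- ===== PORT A =====
-- while tarto != 0: peel the last decimal digit; for tarto < 0 the Python loop never
-- terminates (tarto stays -1), so that branch is unreachable under Pre_ and returns veg.
def isMunLoop (tarto veg : Int) : Int :=
  if tarto = 0 then veg
  else if tarto < 0 then veg  -- Python diverges here; excluded by Pre_isMun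
  else isMunLoop (PySem.Int.floordiv tarto 10)
    (if PySem.Int.mod tarto 10 ≠ 0 then veg + (PySem.Int.mod tarto 10) ^ (PySem.Int.mod tarto 10).toNat else veg)
termination_by tarto.toNat
decreasing_by
  rw [PySem.Int.floordiv_eq_ediv_of_pos (by norm_num)]
  omega

def isMun (szam : Int) : Bool := decide (isMunLoop szam 0 = szam)

-- ===== PORT B =====
-- counts[ch] = counts.get(ch, 0) + 1 over str(szam); then the filtered weighted sum.
def isMun_alt (szam : Int) : Bool :=
  decide (szam = (((((PySem.Int.toStr szam).toList.foldl
      (fun d ch => d.insert ch (d.getD ch 0 + 1)) PySem.Dict.empty).items.filter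
      (fun p => p.1 != '0')).map
    (fun p => p.2 * ((PySem.Int.ofChars? [p.1]).getD 0) ^ ((PySem.Int.ofChars? [p.1]).getD 0).toNat)).sum))

-- ===== PRECONDITION & SPEC =====
-- Pre_ excludes negative inputs: there A's while-loop never terminates (tarto stays -1),
-- and B raises ValueError (int('-')).
def Pre_isMun (szam : Int) : Prop := 0 ≤ szam
instance (szam : Int) : Decidable (Pre_isMun szam) := by unfold Pre_isMun; infer_instance
def pvWitness_isMun : Int := (3435)
def Spec_isMun (szam : Int) (out : Bool) : Prop := out = isMun_alt szam
instance (szam : Int) (out : Bool) : Decidable (Spec_isMun szam out) := by unfold Spec_isMun; infer_instance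

-- ===== CLAIM (what is proved, stated in full; the proofs are below) =====
def Claim_equal_isMun : Prop := ∀ (szam : Int), Dom_isMun szam → Pre_isMun szam → Spec_isMun szam (isMun szam)

-- ===== LEMMAS AND PROOFS =====

-- contribution of one decimal digit d: d**d, except 0 contributes nothing
def digContrib (d : Nat) : Int := if d ≠ 0 then (d : Int) ^ d else 0

-- the sum A computes, as a recursion on the number
def digSum (m : Nat) : Int :=
  if h : m = 0 then 0 else digContrib (m % 10) + digSum (m / 10)
decreasing_by exact Nat.div_lt_self (Nat.pos_of_ne_zero h) (by norm_num)

-- contribution of one character of str(szam), as B computes it per occurrence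
def charContrib (c : Char) : Int :=
  if c != '0'
  then ((PySem.Int.ofChars? [c]).getD 0) ^ ((PySem.Int.ofChars? [c]).getD 0).toNat
  else 0

lemma charContrib_digitChar (k : Nat) (hk : k < 10) :
    charContrib (Nat.digitChar k) = digContrib k := by
  interval_cases k <;> decide

-- a 0/1-weighted sum over a nodup list picks out the one matching key
lemma single_weight_sum (g : Char → Int) (a : Char) :
    ∀ l : List Char, l.Nodup → a ∈ l →
      (l.map (fun k => (if k == a then (1 : Int) else 0) * g k)).sum = g a := by
  intro l
  induction l with
  | nil => intro _ h; cases h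
  | cons b l ih =>
    intro hnd hmem
    rw [List.map_cons, List.sum_cons]
    by_cases hba : b = a
    · have hnl : a ∉ l := hba ▸ (List.nodup_cons.mp hnd).1
      have hz : ((l.map (fun k => (if k == a then (1 : Int) else 0) * g k)).sum) = 0 := by
        apply List.sum_eq_zero
        intro x hx
        obtain ⟨k, hk, rfl⟩ := List.mem_map.mp hx
        have hne : k ≠ a := fun e => hnl (e ▸ hk)
        simp [hne]
      rw [hz, add_zero, hba]
      simp
    · have hmem' : a ∈ l := by
        cases hmem with
        | head => exact absurd rfl hba
        | tail _ h => exact h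
      rw [ih (List.nodup_cons.mp hnd).2 hmem']
      simp [hba]

-- the multiplicity-weighted sum over a covering nodup key list equals the per-occurrence sum
lemma weighted_sum (g : Char → Int) (l : List Char) (hl : l.Nodup) :
    ∀ cs : List Char, (∀ c ∈ cs, c ∈ l) →
      (l.map (fun k => (cs.count k : Int) * g k)).sum = (cs.map g).sum := by
  intro cs
  induction cs with
  | nil => intro _; simp
  | cons a cs ih =>
    intro hsub
    have hstep : (l.map (fun k => ((List.count k (a :: cs) : Nat) : Int) * g k))
        = l.map (fun k => ((cs.count k : Int) * g k) + (if k == a then (1 : Int) else 0) * g k) := by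
      apply List.map_congr_left
      intro k _
      rw [List.count_cons]
      push_cast
      by_cases hka : a = k
      · subst hka; simp; ring
      · have hka' : ¬ (a == k) = true := by simp [hka]
        have hka2 : k ≠ a := fun e => hka e.symm
        simp [hka', hka2]
    rw [hstep, PySem.List.sum_map_add_int,
      ih (fun c hc => hsub c (List.mem_cons_of_mem a hc)),
      single_weight_sum g a l hl (hsub a (List.mem_cons_self))]
    rw [List.map_cons, List.sum_cons]
    ring

-- the filtered weighted sum B computes is the per-occurrence char sum
lemma bsum_eq (cs : List Char) :
    ((((PySem.Set.ofList cs).map (fun k => (k, (cs.count k : Int)))).filter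
        (fun p => p.1 != '0')).map
      (fun p => p.2 * ((PySem.Int.ofChars? [p.1]).getD 0) ^ ((PySem.Int.ofChars? [p.1]).getD 0).toNat)).sum
      = (cs.map charContrib).sum := by
  have h1 : ∀ l : List Char,
      (((l.map (fun k => (k, (cs.count k : Int)))).filter (fun p => p.1 != '0')).map
        (fun p => p.2 * ((PySem.Int.ofChars? [p.1]).getD 0) ^ ((PySem.Int.ofChars? [p.1]).getD 0).toNat)).sum
      = (l.map (fun k => (cs.count k : Int) * charContrib k)).sum := by
    intro l
    induction l with
    | nil => rfl
    | cons k l ih =>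
      simp only [List.map_cons, List.filter_cons]
      by_cases hk : (k != '0') = true
      · rw [if_pos hk, List.map_cons, List.sum_cons, ih, List.sum_cons]
        simp [charContrib, hk]
      · rw [if_neg hk, ih, List.sum_cons]
        simp only [bne_iff_ne, ne_eq, Decidable.not_not] at hk
        simp [charContrib, hk]
  rw [h1]
  exact weighted_sum charContrib (PySem.Set.ofList cs) (PySem.Set.nodup_ofList cs) cs
    (fun c hc => (PySem.Set.mem_ofList cs c).mpr hc)

lemma toDigitsCore_sum (fuel : Nat) : ∀ (n : Nat) (acc : List Char), n < fuel →
    ((Nat.toDigitsCore 10 fuel n acc).map charContrib).sum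
      = digSum n + (acc.map charContrib).sum := by
  induction fuel with
  | zero => intro n acc h; omega
  | succ fuel ih =>
    intro n acc h
    have dz : digSum 0 = 0 := by rw [digSum]; rfl
    rw [Nat.toDigitsCore]
    by_cases h10 : n / 10 = 0
    · rw [if_pos h10, List.map_cons, List.sum_cons,
        charContrib_digitChar (n % 10) (Nat.mod_lt _ (by norm_num))]
      have hds : digSum n = digContrib (n % 10) := by
        by_cases hn : n = 0
        · subst hn; rw [digSum]; simp [digContrib]
        · rw [digSum, dif_neg hn, h10, dz, add_zero]
      rw [hds]
    · rw [if_neg h10]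
      have hn : n ≠ 0 := by intro e; subst e; simp at h10
      have hlt : n / 10 < fuel := by
        have := Nat.div_lt_self (Nat.pos_of_ne_zero hn) (show 1 < 10 by norm_num)
        omega
      rw [ih (n / 10) _ hlt, List.map_cons, List.sum_cons,
        charContrib_digitChar (n % 10) (Nat.mod_lt _ (by norm_num))]
      conv_rhs => rw [digSum, dif_neg hn]
      ring

lemma loop_eq (m : Nat) : ∀ veg : Int, isMunLoop (m : Int) veg = veg + digSum m := by
  induction m using Nat.strong_induction_on with
  | _ m ih =>
    intro veg
    by_cases hm : m = 0
    · subst hm; rw [isMunLoop, digSum]; simp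
    · rw [isMunLoop]
      have h0 : ¬ ((m : Int) = 0) := by omega
      have h1 : ¬ ((m : Int) < 0) := by omega
      rw [if_neg h0, if_neg h1]
      have hf : PySem.Int.floordiv (m : Int) 10 = ((m / 10 : Nat) : Int) := by
        exact_mod_cast PySem.Int.floordiv_natCast m 10
      have hmd : PySem.Int.mod (m : Int) 10 = ((m % 10 : Nat) : Int) := by
        exact_mod_cast PySem.Int.mod_natCast m 10
      rw [hf, hmd]
      have hlt : m / 10 < m := Nat.div_lt_self (Nat.pos_of_ne_zero hm) (by norm_num)
      rw [ih (m / 10) hlt]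
      conv_rhs => rw [digSum, dif_neg hm]
      by_cases hd : m % 10 = 0
      · simp [hd, digContrib]
      · have hd' : ((m % 10 : Nat) : Int) ≠ 0 := by exact_mod_cast hd
        rw [if_pos hd']
        have ht : ((m % 10 : Nat) : Int).toNat = m % 10 := by omega
        rw [ht]
        simp only [digContrib, if_pos hd]
        ring

lemma alt_eq (m : Nat) : isMun_alt (m : Int) = decide ((m : Int) = digSum m) := by
  unfold isMun_alt
  rw [PySem.Dict.foldl_insert_getD_add_one_eq_counter, PySem.Dict.items_counter,
    PySem.Int.toList_toStr]
  have hchars : PySem.Int.toChars (m : Int) = Nat.toDigits 10 m := by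
    simp [PySem.Int.toChars]
  rw [hchars, bsum_eq]
  unfold Nat.toDigits
  rw [toDigitsCore_sum (m + 1) m [] (by omega)]
  simp

-- ===== VERDICT (by name: the statement is the Claim_ definition above) =====
theorem isMun_spec : Claim_equal_isMun := by
  intro szam _ hpre
  unfold Spec_isMun isMun
  obtain ⟨m, rfl⟩ := Int.eq_ofNat_of_zero_le hpre
  rw [alt_eq, loop_eq m 0]
  simp [eq_comm]
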